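-- pv_equiv track=rewrite | github.com/TiagoJanela/MMP-potency-prediction | ccrlib_master/utils_mmp.py | count_heavy_atoms
-- ===== SOURCE A (Python) =====
-- def count_heavy_atoms(smi: str):
--     """
--     Count the number of heavy atoms in a Smiles string
--
--     :param smi: Smiles
--     :return: number of heavy atoms
--
--     >>> count_heavy_atoms("Oc1cc(N)ccc1C")
--     9
--     >>> count_heavy_atoms("[CH3]N1C(=NC(C1=O)(c2ccccc2)c3cc[cH]cc3)N")
--     20
--     >>> count_heavy_atoms("CC[C@H](C)[C@@H]1C(=O)N[C@@H](C(=O)N1[C@H](C2=COC(=N2)C)C(=O)N3CCOCC3)C4CC5=CC=CC=C5C4")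
--     36
--     """
--     # assumes only implicit hydrogens!
--     in_bracket = 0
--     heavy_count = 0
--     for c in smi:
--         if in_bracket:
--             if in_bracket == 1 and c not in "HR*":
--                 heavy_count += 1
--             in_bracket = 0 if c == "]" else in_bracket + 1
--         elif c == "[":
--             in_bracket = 1
--         elif c.upper() in "BCNOSPFI":
--             heavy_count += 1
--     return heavy_count
-- ===== SOURCE B (Python) =====
-- def _heavy_letters(s):
--     return sum(1 for c in s if c.upper() in "BCNOSPFI")
--
-- def count_heavy_atoms(smi: str):
--     """Staged partition-based scan: split off the unbracketed prefix with
--     str.partition and count it in one filtered sum, judge each bracket group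
--     by its first character, then continue after the closing bracket."""
--     total = 0
--     rest = smi
--     while True:
--         before, sep, after = rest.partition('[')
--         total += _heavy_letters(before)
--         if not sep:
--             return total
--         if after and after[0] not in "HR*":
--             total += 1
--         _inner, sep2, rest = after.partition(']')
--         if not sep2:
--             return total
-- ===== Notes on version B (the rewrite author's own statement) =====
-- stated objective: alternative
-- what changed: Replaces A's per-character state machine (in_bracket counter) by a staged scan built on str.partition: each round splits off the unbracketed prefix and counts it with one filtered sum, decides the bracket group from its first character, and resumes after the closing bracket.
import Mathlib
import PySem

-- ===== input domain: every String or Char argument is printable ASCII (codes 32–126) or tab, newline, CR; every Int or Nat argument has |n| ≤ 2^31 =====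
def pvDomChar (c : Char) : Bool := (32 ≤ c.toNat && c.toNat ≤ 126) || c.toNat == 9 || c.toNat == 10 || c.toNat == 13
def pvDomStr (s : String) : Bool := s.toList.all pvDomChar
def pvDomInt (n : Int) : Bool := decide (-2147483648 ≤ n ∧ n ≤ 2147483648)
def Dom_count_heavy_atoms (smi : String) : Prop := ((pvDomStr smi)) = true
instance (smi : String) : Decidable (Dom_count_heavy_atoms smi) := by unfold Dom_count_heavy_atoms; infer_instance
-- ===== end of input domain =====

-- B replaces A's per-character state machine by a staged partition-based scan
-- (same linear cost; the objective is an alternative decomposition).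

-- ===== PORT A =====
-- for-loop over the characters with state (in_bracket, heavy_count)
def pvALoop : List Char → Int → Int → Int
  | [], _, heavy => heavy
  | c :: rest, inb, heavy =>
    if inb ≠ 0 then
      let heavy := if inb = 1 ∧ ¬ (c ∈ ['H', 'R', '*']) then heavy + 1 else heavy
      pvALoop rest (if c = ']' then 0 else inb + 1) heavy
    else if c = '[' then
      pvALoop rest 1 heavy
    else if PySem.Chars.upperChar c ∈ ['B','C','N','O','S','P','F','I'] then
      pvALoop rest inb (heavy + 1)
    else
      pvALoop rest inb heavy

def count_heavy_atoms (smi : String) : Int := pvALoop smi.toList 0 0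

-- ===== PORT B =====
-- s.partition(sep) for a single-character sep, ported by hand over List Char
-- (exact: (part before first occurrence, whether found, part after it))
def pvPartition : List Char → Char → List Char × Bool × List Char
  | [], _ => ([], false, [])
  | x :: r, c =>
    if x = c then ([], true, r)
    else
      let p := pvPartition r c
      (x :: p.1, p.2.1, p.2.2)

-- _heavy_letters: sum(1 for c in s if c.upper() in "BCNOSPFI")
def pvHeavy : List Char → Int
  | [] => 0
  | c :: r => (if PySem.Chars.upperChar c ∈ ['B','C','N','O','S','P','F','I'] then 1 else 0) + pvHeavy r

-- termination facts for the while-loop below (cited by decreasing_by)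
theorem pvPartition_after_lt (cs : List Char) (c : Char)
    (h : (pvPartition cs c).2.1 = true) : (pvPartition cs c).2.2.length < cs.length := by
  induction cs with
  | nil => simp [pvPartition] at h
  | cons x r ih =>
    by_cases hx : x = c
    · simp [pvPartition, hx]
    · simp only [pvPartition, if_neg hx] at h ⊢
      exact Nat.lt_trans (ih h) (by simp)

-- while True: partition off the prefix, count it, handle one bracket group, loop
def pvBLoop (rest : List Char) (total : Int) : Int :=
  let before := (pvPartition rest '[').1
  let sep := (pvPartition rest '[').2.1
  let after := (pvPartition rest '[').2.2
  let total := total + pvHeavy before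
  if sep = false then total
  else
    let total :=
      match after with
      | [] => total
      | a :: _ => if a ∈ ['H', 'R', '*'] then total else total + 1
    let sep2 := (pvPartition after ']').2.1
    let rest' := (pvPartition after ']').2.2
    if sep2 = false then total else pvBLoop rest' total
termination_by rest.length
decreasing_by
  rename_i h1 h2
  have ha := pvPartition_after_lt rest '[' (Bool.ne_false_iff.mp h1)
  have hb := pvPartition_after_lt (pvPartition rest '[').2.2 ']' (Bool.ne_false_iff.mp h2)
  omega

def count_heavy_atoms_alt (smi : String) : Int := pvBLoop smi.toList 0

-- ===== PRECONDITION & SPEC =====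
def Spec_count_heavy_atoms (smi : String) (out : Int) : Prop := out = count_heavy_atoms_alt smi
instance (smi : String) (out : Int) : Decidable (Spec_count_heavy_atoms smi out) := by unfold Spec_count_heavy_atoms; infer_instance

-- ===== CLAIM (what is proved, stated in full; the proofs are below) =====
def Claim_equal_count_heavy_atoms : Prop := ∀ (smi : String), Dom_count_heavy_atoms smi → Spec_count_heavy_atoms smi (count_heavy_atoms smi)

-- ===== LEMMAS AND PROOFS =====

-- what A does once in_bracket ≥ 2: swallow up to and including the first ']'
def pvDropBr : List Char → List Char
  | [] => []
  | c :: rest => if c = ']' then rest else pvDropBr rest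

theorem pvALoop_bracket (rest : List Char) (b heavy : Int) (hb : 2 ≤ b) :
    pvALoop rest b heavy = pvALoop (pvDropBr rest) 0 heavy := by
  induction rest generalizing b with
  | nil => simp [pvALoop, pvDropBr]
  | cons c r ih =>
    by_cases hc : c = ']'
    · simp only [pvALoop, pvDropBr, if_pos hc, if_pos (show b ≠ 0 by omega)]
      rw [if_neg (show ¬ (b = 1 ∧ ¬ c ∈ ['H','R','*']) from fun h => by omega)]
    · simp only [pvALoop, pvDropBr, if_neg hc, if_pos (show b ≠ 0 by omega)]
      rw [if_neg (show ¬ (b = 1 ∧ ¬ c ∈ ['H','R','*']) from fun h => by omega)]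
      exact ih (b + 1) (by omega)

theorem pvDropBr_eq_partition (t : List Char) : pvDropBr t = (pvPartition t ']').2.2 := by
  induction t with
  | nil => rfl
  | cons x r ih =>
    by_cases hx : x = ']'
    · simp [pvDropBr, pvPartition, hx]
    · simp [pvDropBr, pvPartition, hx, ih]

theorem pvPartition_not_found (cs : List Char) (c : Char)
    (h : (pvPartition cs c).2.1 = false) :
    (pvPartition cs c).1 = cs ∧ (pvPartition cs c).2.2 = [] := by
  induction cs with
  | nil => simp [pvPartition]
  | cons x r ih =>
    by_cases hx : x = c
    · simp [pvPartition, hx] at h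
    · simp only [pvPartition, if_neg hx] at h ⊢
      exact ⟨by simp [(ih h).1], (ih h).2⟩

theorem pvPartition_found (cs : List Char) (c : Char)
    (h : (pvPartition cs c).2.1 = true) :
    cs = (pvPartition cs c).1 ++ c :: (pvPartition cs c).2.2 ∧ c ∉ (pvPartition cs c).1 := by
  induction cs with
  | nil => simp [pvPartition] at h
  | cons x r ih =>
    by_cases hx : x = c
    · simp [pvPartition, hx]
    · simp only [pvPartition, if_neg hx] at h ⊢
      refine ⟨?_, ?_⟩
      · have := (ih h).1
        simpa using congrArg (List.cons x) this
      · intro hm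
        rcases List.mem_cons.mp hm with he | he
        · exact hx he.symm
        · exact (ih h).2 he

theorem pvPartition_mem (cs : List Char) (c : Char) (h : c ∈ cs) :
    (pvPartition cs c).2.1 = true := by
  induction cs with
  | nil => simp at h
  | cons x r ih =>
    by_cases hx : x = c
    · simp [pvPartition, hx]
    · simp only [pvPartition, if_neg hx]
      exact ih (by rcases List.mem_cons.mp h with he | he; exact absurd he.symm hx; exact he)

-- A over a bracket-free prefix just adds its heavy-letter count
theorem pvALoop_prefix (a : List Char) (ha : '[' ∉ a) (rest : List Char) (h : Int) :
    pvALoop (a ++ rest) 0 h = pvALoop rest 0 (h + pvHeavy a) := by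
  induction a generalizing h with
  | nil => simp [pvHeavy]
  | cons x r ih =>
    have hx : x ≠ '[' := fun he => ha (he ▸ List.mem_cons_self)
    have hr : '[' ∉ r := fun hm => ha (List.mem_cons_of_mem _ hm)
    by_cases hm : PySem.Chars.upperChar x ∈ ['B','C','N','O','S','P','F','I'] <;>
      simp [pvALoop, hx, hm, pvHeavy, ih hr, add_assoc, add_comm (1 : Int)]

-- one bracket step of A, starting at the '['
theorem pvALoop_group (x : Char) (t : List Char) (h : Int) :
    pvALoop ('[' :: x :: t) 0 h =
      (if x = ']' then pvALoop t 0 else pvALoop (pvDropBr t) 0)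
        (if x ∈ ['H','R','*'] then h else h + 1) := by
  by_cases hx : x = ']' <;> by_cases hm : x ∈ ['H','R','*'] <;>
    simp [pvALoop, hx, hm, pvALoop_bracket t 2 _ (by norm_num)]

theorem pvMain (n : Nat) (cs : List Char) (hn : cs.length ≤ n) (heavy : Int) :
    pvALoop cs 0 heavy = pvBLoop cs heavy := by
  induction n generalizing cs heavy with
  | zero =>
    have : cs = [] := List.eq_nil_of_length_eq_zero (by omega)
    subst this
    rw [pvBLoop]
    simp [pvALoop, pvPartition, pvHeavy]
  | succ n ih =>
    rw [pvBLoop]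
    by_cases hsep : (pvPartition cs '[').2.1 = false
    · -- no '[': the whole string is the bracket-free prefix
      obtain ⟨hb, -⟩ := pvPartition_not_found cs '[' hsep
      have hnotin : '[' ∉ cs := fun hm => by
        rw [pvPartition_mem cs '[' hm] at hsep; exact absurd hsep (by simp)
      conv_lhs => rw [← List.append_nil cs]
      rw [pvALoop_prefix cs hnotin [] heavy]
      simp [pvALoop, hb, hsep]
    · -- found '['
      have hsep' : (pvPartition cs '[').2.1 = true := Bool.ne_false_iff.mp hsep
      obtain ⟨hcs, hnotin⟩ := pvPartition_found cs '[' hsep'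
      have hlen := pvPartition_after_lt cs '[' hsep'
      conv_lhs => rw [hcs]
      rw [pvALoop_prefix _ hnotin]
      cases hafter : (pvPartition cs '[').2.2 with
      | nil =>
        simp [pvALoop, pvPartition, hsep']
      | cons x t =>
        rw [hafter] at hlen
        have hlt : t.length + 1 < cs.length := by simpa using hlen
        rw [pvALoop_group]
        simp only [hsep', Bool.true_eq_false, if_false]
        by_cases hx : x = ']'
        · subst hx
          have hpa : pvPartition (']' :: t) ']' = ([], true, t) := by simp [pvPartition]
          rw [if_pos rfl]
          simp only [hpa, Bool.true_eq_false, if_false]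
          rw [if_neg (by decide : ¬ (']' : Char) ∈ ['H','R','*'])]
          exact ih t (by omega) _
        · rw [if_neg hx]
          have hpa1 : (pvPartition (x :: t) ']').2.1 = (pvPartition t ']').2.1 := by
            simp [pvPartition, hx]
          have hpa2 : (pvPartition (x :: t) ']').2.2 = (pvPartition t ']').2.2 := by
            simp [pvPartition, hx]
          rw [pvDropBr_eq_partition]
          by_cases hs2 : (pvPartition t ']').2.1 = false
          · obtain ⟨-, hrest⟩ := pvPartition_not_found t ']' hs2
            simp only [hpa1, hpa2, hs2, hrest]
            simp [pvALoop]
          · have hs2' : (pvPartition t ']').2.1 = true := Bool.ne_false_iff.mp hs2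
            have hrl := pvPartition_after_lt t ']' hs2'
            simp only [hpa1, hpa2, hs2', Bool.true_eq_false, if_false]
            exact ih (pvPartition t ']').2.2 (by omega) _

-- ===== VERDICT (by name: the statement is the Claim_ definition above) =====
theorem count_heavy_atoms_spec : Claim_equal_count_heavy_atoms := by
  intro smi _
  unfold Spec_count_heavy_atoms count_heavy_atoms count_heavy_atoms_alt
  exact pvMain smi.toList.length smi.toList (le_refl _) 0
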